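-- pv_equiv track=rewrite | github.com/saipraneeth96/100-Days-coding-challenge | Day 71.py | count_boasting_students
-- ===== SOURCE A (Python) =====
-- def count_boasting_students(T, test_cases):
--     results = []
--     for case in test_cases:
--         N, scores = case
--         scores.sort()  # Sort the scores
--         boasting_count = 0
--
--         for i in range(N):
--             # Count students with scores ≤ scores[i]
--             count_le = i + 1  # All elements up to the current index are ≤ scores[i]
--             count_gt = N - count_le  # Remaining elements are > scores[i]
--
--             if count_le > count_gt:
--                 boasting_count += 1
--
--         results.append(boasting_count)
--     return results
-- ===== SOURCE B (Python) =====
-- def count_boasting_students(T, test_cases):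
--     # Closed form: the loop only compares i+1 with N-(i+1); scores never matter.
--     # Count of i in [0,N) with 2*(i+1) > N is ceil(N/2) = (N+1)//2 for N > 0, else 0.
--     return [(N + 1) // 2 if N > 0 else 0 for N, _ in test_cases]
-- ===== Notes on version B (the rewrite author's own statement) =====
-- stated objective: faster
-- what changed: A sorts each score list and loops over range(N) counting indices; B observes the loop never reads the scores and replaces sort+loop by the closed form (N+1)//2 per case.
import Mathlib
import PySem

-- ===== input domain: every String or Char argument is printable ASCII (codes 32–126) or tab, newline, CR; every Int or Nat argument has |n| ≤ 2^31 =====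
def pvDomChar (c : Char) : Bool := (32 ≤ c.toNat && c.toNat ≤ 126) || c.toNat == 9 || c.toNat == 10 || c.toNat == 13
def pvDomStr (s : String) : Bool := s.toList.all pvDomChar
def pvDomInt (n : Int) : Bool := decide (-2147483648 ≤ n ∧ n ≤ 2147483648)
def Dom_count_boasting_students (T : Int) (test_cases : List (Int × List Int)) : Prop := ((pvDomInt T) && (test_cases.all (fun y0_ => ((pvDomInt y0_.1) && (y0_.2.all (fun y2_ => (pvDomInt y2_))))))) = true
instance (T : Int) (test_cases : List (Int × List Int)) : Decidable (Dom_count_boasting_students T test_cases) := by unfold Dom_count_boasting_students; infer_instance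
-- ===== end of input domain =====

-- ===== PORT A =====
-- B replaces A's per-case sort + O(N) counting loop by the closed form (N+1)//2 (faster, measured).
-- Python A sorts each scores list in place; B does not: the equivalence proved is about the RETURN value only.
-- A counts indices i < N with i+1 > N-(i+1); the scores themselves are never read.
def count_boasting_students (T : Int) (test_cases : List (Int × List Int)) : List Int :=
  test_cases.foldl (fun (results : List Int) (case : Int × List Int) =>
    let N := case.1
    let _scores := PySem.List.sorted case.2 (fun x => x)   -- scores.sort(): sorted list, never read afterwards
    let boasting_count := (PySem.List.pyRange 0 N 1).foldl (fun (bc : Int) (i : Int) =>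
      let count_le := i + 1
      let count_gt := N - count_le
      if count_le > count_gt then bc + 1 else bc) (0 : Int)
    results ++ [boasting_count]) ([] : List Int)

-- ===== PORT B =====
-- B: closed form (N+1)//2 per case (0 for N ≤ 0); no sort, no loop over N.
def count_boasting_students_alt (T : Int) (test_cases : List (Int × List Int)) : List Int :=
  test_cases.map (fun case => if case.1 > 0 then PySem.Int.floordiv (case.1 + 1) 2 else 0)

-- ===== PRECONDITION & SPEC =====
def Spec_count_boasting_students (T : Int) (test_cases : List (Int × List Int)) (out : List Int) : Prop := out = count_boasting_students_alt T test_cases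
instance (T : Int) (test_cases : List (Int × List Int)) (out : List Int) : Decidable (Spec_count_boasting_students T test_cases out) := by unfold Spec_count_boasting_students; infer_instance

-- ===== CLAIM (what is proved, stated in full; the proofs are below) =====
def Claim_equal_count_boasting_students : Prop := ∀ (T : Int) (test_cases : List (Int × List Int)), Dom_count_boasting_students T test_cases → Spec_count_boasting_students T test_cases (count_boasting_students T test_cases)

-- ===== LEMMAS AND PROOFS =====

-- The inner foldl adds 1 for each element satisfying the comparison: it is a countP.
theorem pv_foldl_count (N : Int) (l : List Int) (acc : Int) :
    l.foldl (fun bc i => if i + 1 > N - (i + 1) then bc + 1 else bc) acc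
      = acc + (l.countP (fun i => decide (N < 2 * i + 2)) : Int) := by
  induction l generalizing acc with
  | nil => simp
  | cons a t ih =>
      simp only [List.foldl_cons, List.countP_cons, ih]
      by_cases h : N < 2 * a + 2
      · simp [h, show a + 1 > N - (a + 1) from by omega]; ring
      · simp [h, show ¬ a + 1 > N - (a + 1) from by omega]

-- Counting k < n with n < 2k+2 over List.range.
theorem pv_count_range (n m : Nat) :
    List.countP (fun k : Nat => decide ((m : Int) < 2 * (0 + (k : Int)) + 2)) (List.range n)
      = n - min n (m / 2) := by
  induction n with
  | zero => simp
  | succ n ih =>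
      rw [List.range_succ, List.countP_append, ih]
      simp only [List.countP_cons, List.countP_nil]
      by_cases h' : m < 2 * n + 2
      · have h : ((m : Int) < 2 * (0 + (n : Int)) + 2) := by omega
        simp only [h, decide_true, if_true]
        omega
      · have h : ¬ ((m : Int) < 2 * (0 + (n : Int)) + 2) := by omega
        simp only [h, decide_false, Bool.false_eq_true, if_false]
        omega

-- One test case: A's inner loop equals B's closed form.
theorem pv_case (N : Int) :
    (PySem.List.pyRange 0 N 1).foldl (fun bc i =>
        if i + 1 > N - (i + 1) then bc + 1 else bc) 0
      = (if N > 0 then PySem.Int.floordiv (N + 1) 2 else 0) := by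
  rw [pv_foldl_count, PySem.List.pyRange_one]
  rw [List.countP_map]
  by_cases hN : N > 0
  · obtain ⟨n, rfl⟩ : ∃ n : Nat, N = (n : Int) := ⟨N.toNat, by omega⟩
    have hr : ((n : Int) - 0).toNat = n := by omega
    rw [hr]
    have hc : List.countP ((fun i => decide ((n : Int) < 2 * i + 2)) ∘
        fun k : Nat => (0 : Int) + (k : Int)) (List.range n) = n - min n (n / 2) := by
      have := pv_count_range n n
      simpa [Function.comp_def] using this
    rw [hc]
    have hfd : PySem.Int.floordiv ((n : Int) + 1) 2 = (((n + 1) / 2 : Nat) : Int) := by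
      exact_mod_cast PySem.Int.floordiv_natCast (n + 1) 2
    simp only [hN, if_pos]
    rw [hfd]
    have : n - min n (n / 2) = (n + 1) / 2 := by omega
    omega
  · have h0 : (N - 0).toNat = 0 := by omega
    rw [h0]
    simp [hN]

theorem pv_outer (l : List (Int × List Int)) (acc : List Int) :
    l.foldl (fun results case =>
      results ++ [(PySem.List.pyRange 0 case.1 1).foldl (fun (bc : Int) (i : Int) =>
        if i + 1 > case.1 - (i + 1) then bc + 1 else bc) (0 : Int)]) acc
    = acc ++ l.map (fun case =>
        if case.1 > 0 then PySem.Int.floordiv (case.1 + 1) 2 else 0) := by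
  induction l generalizing acc with
  | nil => simp
  | cons a t ih =>
      rw [List.foldl_cons, ih, pv_case a.1, List.map_cons, List.append_assoc,
        List.singleton_append]

-- ===== VERDICT (by name: the statement is the Claim_ definition above) =====
theorem count_boasting_students_spec : Claim_equal_count_boasting_students := by
  intro T test_cases _
  unfold Spec_count_boasting_students
  simp only [count_boasting_students, count_boasting_students_alt]
  simpa using pv_outer test_cases []
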